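-- pv_equiv track=rewrite | github.com/mrinmoy2developer/Maze_Game_Solver | backend/utils.py | check_positions_overlap
-- ===== SOURCE A (Python) =====
-- def check_positions_overlap(positions):
--     """Check if any 2x2 tile positions overlap."""
--     occupied_cells = set()
--     for pos in positions:
--         top_row, left_col = pos
--         for i in range(2):
--             for j in range(2):
--                 cell = (top_row + i, left_col + j)
--                 if cell in occupied_cells:
--                     return True
--                 occupied_cells.add(cell)
--     return False
-- ===== SOURCE B (Python) =====
-- def check_positions_overlap(positions):
--     """Check if any 2x2 tile positions overlap."""
--     # Two axis-aligned 2x2 tiles overlap iff their top-left corners are within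
--     # Chebyshev distance 1, so compare each tile directly with every earlier one.
--     return any(abs(q[0] - p[0]) <= 1 and abs(q[1] - p[1]) <= 1
--                for i, q in enumerate(positions)
--                for p in positions[:i])
-- ===== Notes on version B (the rewrite author's own statement) =====
-- stated objective: alternative
-- what changed: Replaces the occupied-cell set entirely by a geometric pairwise test: two 2x2 tiles overlap iff their top-left corners are within Chebyshev distance 1, so B compares each position with every earlier one and never materialises any cells.
import Mathlib
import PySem

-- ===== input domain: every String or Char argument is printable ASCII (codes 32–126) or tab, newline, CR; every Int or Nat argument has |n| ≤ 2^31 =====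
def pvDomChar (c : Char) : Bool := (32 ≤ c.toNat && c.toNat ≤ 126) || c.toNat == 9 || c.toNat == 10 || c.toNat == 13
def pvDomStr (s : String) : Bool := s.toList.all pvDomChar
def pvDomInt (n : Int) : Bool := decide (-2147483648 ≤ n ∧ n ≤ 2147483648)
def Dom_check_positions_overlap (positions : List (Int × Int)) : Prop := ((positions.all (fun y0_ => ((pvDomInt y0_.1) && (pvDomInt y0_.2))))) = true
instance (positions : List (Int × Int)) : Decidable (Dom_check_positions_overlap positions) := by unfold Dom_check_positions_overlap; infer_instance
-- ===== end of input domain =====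

-- B drops A's occupied-cell set: two 2x2 tiles overlap iff their top-left corners are
-- within Chebyshev distance 1, so B is a pairwise corner-distance check. Objective: alternative.

-- ===== PORT A =====
-- the four cells of one position, as the nested 'for i in range(2): for j in range(2)' produces them
def pvCellsOf (p : Int × Int) : List (Int × Int) :=
  (PySem.List.pyRange 0 2 1).flatMap (fun i =>
    (PySem.List.pyRange 0 2 1).map (fun j => (p.1 + i, p.2 + j)))

-- the inner cell loop: none = 'return True' fired, some occ = updated occupied_cells
def pvScanCells : PySem.Set (Int × Int) → List (Int × Int) → Option (PySem.Set (Int × Int))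
  | occ, [] => some occ
  | occ, c :: rest =>
      if PySem.Set.contains occ c then none else pvScanCells (PySem.Set.add occ c) rest

-- the outer 'for pos in positions' loop
def pvGoA : PySem.Set (Int × Int) → List (Int × Int) → Bool
  | _, [] => false
  | occ, p :: rest =>
      match pvScanCells occ (pvCellsOf p) with
      | none => true
      | some occ' => pvGoA occ' rest

def check_positions_overlap (positions : List (Int × Int)) : Bool :=
  pvGoA PySem.Set.empty positions

-- ===== PORT B =====
-- abs(q[0]-p[0]) <= 1 and abs(q[1]-p[1]) <= 1
def pvClose (p q : Int × Int) : Bool :=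
  decide (|q.1 - p.1| ≤ 1 ∧ |q.2 - p.2| ≤ 1)

def check_positions_overlap_alt (positions : List (Int × Int)) : Bool :=
  (PySem.List.enumerate positions).any (fun iq =>
    (PySem.List.slice positions none (some iq.1)).any (fun p => pvClose p iq.2))

-- ===== PRECONDITION & SPEC =====
def Spec_check_positions_overlap (positions : List (Int × Int)) (out : Bool) : Prop := out = check_positions_overlap_alt positions
instance (positions : List (Int × Int)) (out : Bool) : Decidable (Spec_check_positions_overlap positions out) := by unfold Spec_check_positions_overlap; infer_instance

-- ===== CLAIM (what is proved, stated in full; the proofs are below) =====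
def Claim_equal_check_positions_overlap : Prop := ∀ (positions : List (Int × Int)), Dom_check_positions_overlap positions → Spec_check_positions_overlap positions (check_positions_overlap positions)

-- ===== LEMMAS AND PROOFS =====

theorem pvScanCells_cons (occ : PySem.Set (Int × Int)) (c : Int × Int) (l : List (Int × Int)) :
    pvScanCells occ (c :: l)
      = (if PySem.Set.contains occ c then none else pvScanCells (PySem.Set.add occ c) l) := rfl

theorem pvScanCells_append (xs ys : List (Int × Int)) (occ : PySem.Set (Int × Int)) :
    pvScanCells occ (xs ++ ys) = (pvScanCells occ xs).bind (fun o => pvScanCells o ys) := by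
  induction xs generalizing occ with
  | nil => rfl
  | cons c rest ih =>
      rw [List.cons_append, pvScanCells_cons, pvScanCells_cons]
      by_cases h : c ∈ occ
      · simp [h]
      · simp [h, ih]

theorem pvGoA_eq_scan (ps : List (Int × Int)) (occ : PySem.Set (Int × Int)) :
    pvGoA occ ps = (pvScanCells occ (ps.flatMap pvCellsOf)).isNone := by
  induction ps generalizing occ with
  | nil => rfl
  | cons p rest ih =>
      rw [List.flatMap_cons, pvScanCells_append,
        show pvGoA occ (p :: rest)
          = (match pvScanCells occ (pvCellsOf p) with
             | none => true
             | some occ' => pvGoA occ' rest) from rfl]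
      cases h : pvScanCells occ (pvCellsOf p) with
      | none => rfl
      | some occ' => simpa using ih occ'

-- the incremental scan fires iff the occupied set extended by the cells has a duplicate
theorem pvScanCells_isNone (xs : List (Int × Int)) (occ : PySem.Set (Int × Int))
    (hocc : occ.Nodup) :
    (pvScanCells occ xs).isNone = !decide ((occ ++ xs).Nodup) := by
  induction xs generalizing occ with
  | nil => simp [show pvScanCells occ [] = some occ from rfl, hocc]
  | cons c rest ih =>
      rw [pvScanCells_cons]
      by_cases hc : c ∈ occ
      · have h1 : ¬ (occ ++ c :: rest).Nodup := fun h =>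
          (List.disjoint_of_nodup_append h) hc List.mem_cons_self
        simp [hc, h1]
      · have hnodup : (occ ++ [c]).Nodup := by
          rw [List.nodup_append]
          refine ⟨hocc, List.nodup_singleton c, ?_⟩
          intro x hx y hy
          rw [List.mem_singleton] at hy
          subst hy
          exact fun e => hc (e ▸ hx)
        rw [if_neg (by simp [hc]), PySem.Set.add_of_not_mem hc, ih _ hnodup]
        conv_rhs => rw [List.append_cons]

-- A returns true iff the flattened cell list has a duplicate
theorem pvA_iff_not_nodup (ps : List (Int × Int)) :
    check_positions_overlap ps = true ↔ ¬ (ps.flatMap pvCellsOf).Nodup := by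
  rw [show check_positions_overlap ps = pvGoA PySem.Set.empty ps from rfl,
    pvGoA_eq_scan, pvScanCells_isNone _ PySem.Set.empty List.nodup_nil,
    show (PySem.Set.empty : PySem.Set (Int × Int)) ++ ps.flatMap pvCellsOf
        = ps.flatMap pvCellsOf from rfl]
  simp

theorem pvCellsOf_explicit (p : Int × Int) :
    pvCellsOf p = [(p.1, p.2), (p.1, p.2 + 1), (p.1 + 1, p.2), (p.1 + 1, p.2 + 1)] := by
  simp [pvCellsOf, show PySem.List.pyRange 0 2 1 = [0, 1] from rfl]

theorem pvCellsOf_nodup (p : Int × Int) : (pvCellsOf p).Nodup := by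
  simp [pvCellsOf_explicit, Prod.ext_iff]

-- the geometric core: the cell sets meet iff the corners are within Chebyshev distance 1
theorem pvCells_meet_iff (p q : Int × Int) :
    ¬ (pvCellsOf p).Disjoint (pvCellsOf q) ↔ pvClose p q = true := by
  constructor
  · intro h
    rw [List.disjoint_iff_ne] at h
    push_neg at h
    obtain ⟨a, ha, b, hb, hab⟩ := h
    subst hab
    simp [pvCellsOf_explicit, Prod.ext_iff] at ha hb
    simp [pvClose, abs_le]
    omega
  · intro h
    simp [pvClose, abs_le] at h
    intro hd
    apply hd (a := (if p.1 ≤ q.1 then q.1 else p.1, if p.2 ≤ q.2 then q.2 else p.2)) <;>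
      · simp [pvCellsOf_explicit, Prod.ext_iff]
        split_ifs <;> omega

-- B returns true iff some later position is close to an earlier one
theorem pvB_iff (ps : List (Int × Int)) :
    check_positions_overlap_alt ps = true ↔
      ∃ (k : Nat) (hk : k < ps.length) (m : Nat) (hm : m < k),
        pvClose (ps[m]'(Nat.lt_trans hm hk)) (ps[k]'hk) = true := by
  unfold check_positions_overlap_alt
  rw [List.any_eq_true]
  constructor
  · rintro ⟨iq, hmem, hany⟩
    rw [PySem.List.mem_enumerate_iff] at hmem
    obtain ⟨k, hk, rfl⟩ := hmem
    rw [show ((0 : Int) + k) = (k : Nat) by omega, PySem.List.slice_to_natCast,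
      List.any_eq_true] at hany
    obtain ⟨p, hp, hclose⟩ := hany
    rw [List.mem_iff_getElem] at hp
    obtain ⟨m, hm, rfl⟩ := hp
    rw [List.length_take] at hm
    refine ⟨k, hk, m, by omega, ?_⟩
    rwa [List.getElem_take] at hclose
  · rintro ⟨k, hk, m, hm, hclose⟩
    refine ⟨((0 : Int) + k, ps[k]), ?_, ?_⟩
    · rw [PySem.List.mem_enumerate_iff]; exact ⟨k, hk, rfl⟩
    · rw [show ((0 : Int) + k) = (k : Nat) by omega, PySem.List.slice_to_natCast,
        List.any_eq_true]
      refine ⟨ps[m], ?_, hclose⟩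
      rw [List.mem_iff_getElem]
      exact ⟨m, by simp [List.length_take]; omega, by rw [List.getElem_take]⟩

-- flatMap of the nodup cell blocks is nodup iff the blocks are pairwise disjoint
theorem pv_nodup_flatMap_iff (ps : List (Int × Int)) :
    (ps.flatMap pvCellsOf).Nodup ↔
      ps.Pairwise (fun p q => (pvCellsOf p).Disjoint (pvCellsOf q)) := by
  rw [List.flatMap_def, List.nodup_flatten, List.pairwise_map]
  constructor
  · exact fun h => h.2
  · intro h
    refine ⟨?_, h⟩
    rintro l hl
    rw [List.mem_map] at hl
    obtain ⟨p, _, rfl⟩ := hl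
    exact pvCellsOf_nodup p

-- ===== VERDICT (by name: the statement is the Claim_ definition above) =====
theorem check_positions_overlap_spec : Claim_equal_check_positions_overlap := by
  intro ps _
  show check_positions_overlap ps = check_positions_overlap_alt ps
  rw [Bool.eq_iff_iff, pvA_iff_not_nodup, pv_nodup_flatMap_iff,
    List.pairwise_iff_getElem, pvB_iff]
  push_neg
  constructor
  · rintro ⟨i, j, hi, hj, hij, hnd⟩
    exact ⟨j, hj, i, hij, (pvCells_meet_iff _ _).mp hnd⟩
  · rintro ⟨k, hk, m, hm, hc⟩
    exact ⟨m, k, by omega, hk, hm, (pvCells_meet_iff _ _).mpr hc⟩
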